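-- pv_equiv track=rewrite | github.com/pypi-data/pypi-mirror-197 | packages/fridgeyocr/fridgeyocr-0.1.3-py3-none-any.whl/fridgeyocr/recognition.py | _filter_groups
-- ===== SOURCE A (Python) =====
-- from collections import defaultdict
--
-- def _filter_groups(center_boxes):
--     groups = defaultdict(list)
--     cnt = 0
--     group_cnt = 0
--     while (cnt < len(center_boxes)):
--         temp_group = []
--         prev = cnt
--         temp_box = center_boxes[cnt]
--         more = cnt
--         while True:
--             if more == len(center_boxes):
--                 break
--             more_box = center_boxes[more]
--             if more_box[1] - temp_box[1] <= 5:
--                 more += 1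
--                 temp_box = more_box
--             else:
--                 break
--         for i in range(cnt, more):
--             temp_group.append(i)
--         groups[group_cnt] = temp_group
--         group_cnt += 1
--         if more == prev:
--             cnt = more +1
--         else:
--             cnt = more
--
--     return groups
-- ===== SOURCE B (Python) =====
-- from collections import defaultdict
--
-- def _filter_groups(center_boxes):
--     groups = defaultdict(list)
--     current = []
--     group_id = 0
--     prev_y = 0
--     for i, box in enumerate(center_boxes):
--         y = box[1]
--         if current and y - prev_y > 5:
--             groups[group_id] = current
--             group_id += 1
--             current = [i]
--         else:
--             current.append(i)
--         prev_y = y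
--     if center_boxes:
--         groups[group_id] = current
--     return groups
-- ===== Notes on version B (the rewrite author's own statement) =====
-- stated objective: simpler
-- what changed: Replaced A's nested while-loops (an inner scan re-finding each group's end, a for-loop rebuilding the indices, and index-jump bookkeeping) by a single enumerate pass that appends each index to the running group and flushes it when the chained y-gap exceeds 5.
import Mathlib
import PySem

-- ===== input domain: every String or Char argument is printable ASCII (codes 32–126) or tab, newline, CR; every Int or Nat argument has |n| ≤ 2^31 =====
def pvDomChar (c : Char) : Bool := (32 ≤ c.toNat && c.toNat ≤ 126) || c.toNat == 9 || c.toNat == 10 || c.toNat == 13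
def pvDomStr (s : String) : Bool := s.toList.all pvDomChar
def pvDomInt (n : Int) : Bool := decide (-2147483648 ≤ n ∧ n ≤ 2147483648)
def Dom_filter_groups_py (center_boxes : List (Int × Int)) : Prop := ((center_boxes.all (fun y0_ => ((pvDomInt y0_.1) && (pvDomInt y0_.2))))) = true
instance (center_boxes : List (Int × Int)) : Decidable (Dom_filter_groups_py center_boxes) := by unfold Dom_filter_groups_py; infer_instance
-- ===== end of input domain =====

-- B replaces A's nested while-loops (re-scanning and index jumping) by a single enumerate pass
-- that flushes the running group when the chained y-gap exceeds 5 (objective: simpler).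

-- ===== PORT A =====
-- inner `while True` loop of A: advances `more` while the chained y-difference is ≤ 5.
-- `fuel` (the number of remaining indices) only makes the loop structurally recursive;
-- it is always sufficient at the call site and never alters the computed value.
def pyInnerGo : Nat → List (Int × Int) → Int → Nat → Nat
  | 0, _, _, more => more
  | fuel + 1, boxes, tempY, more =>
    if _h : more < boxes.length then
      if boxes[more].2 - tempY ≤ 5 then pyInnerGo fuel boxes boxes[more].2 (more + 1) else more
    else more

def pyInner (boxes : List (Int × Int)) (tempY : Int) (more : Nat) : Nat :=
  pyInnerGo (boxes.length - more) boxes tempY more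

-- outer `while cnt < len` loop of A, with the groups dict as accumulator (same fuel scheme)
def pyOuterGo : Nat → List (Int × Int) → Nat → Nat → List (Int × List Int) → List (Int × List Int)
  | 0, _, _, _, groups => groups
  | fuel + 1, boxes, cnt, group_cnt, groups =>
    if _h : cnt < boxes.length then
      let prev := cnt
      let more := pyInner boxes boxes[cnt].2 cnt
      let temp_group := (List.range' cnt (more - cnt)).map Int.ofNat
      let groups' := groups ++ [((group_cnt : Int), temp_group)]
      if more = prev then pyOuterGo fuel boxes (more + 1) (group_cnt + 1) groups'
      else pyOuterGo fuel boxes more (group_cnt + 1) groups'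
    else groups

def pyOuter (boxes : List (Int × Int)) (cnt group_cnt : Nat)
    (groups : List (Int × List Int)) : List (Int × List Int) :=
  pyOuterGo (boxes.length - cnt) boxes cnt group_cnt groups

def filter_groups_py (center_boxes : List (Int × Int)) : List (Int × List Int) :=
  pyOuter center_boxes 0 0 []

-- ===== PORT B =====
-- one step of B's for-loop: state = (groups, current, group_id, prev_y)
def altStep (st : List (Int × List Int) × List Int × Nat × Int)
    (p : (Int × Int) × Nat) : List (Int × List Int) × List Int × Nat × Int :=
  let (groups, current, group_id, prevY) := st
  let y := p.1.2
  if current ≠ [] ∧ 5 < y - prevY then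
    (groups ++ [((group_id : Int), current)], [(p.2 : Int)], group_id + 1, y)
  else
    (groups, current ++ [(p.2 : Int)], group_id, y)

def filter_groups_py_alt (center_boxes : List (Int × Int)) : List (Int × List Int) :=
  let st := center_boxes.zipIdx.foldl altStep ([], [], 0, 0)
  if center_boxes = [] then st.1
  else st.1 ++ [((st.2.2.1 : Int), st.2.1)]

-- ===== PRECONDITION & SPEC =====
def Spec_filter_groups_py (center_boxes : List (Int × Int)) (out : List (Int × List Int)) : Prop := out = filter_groups_py_alt center_boxes
instance (center_boxes : List (Int × Int)) (out : List (Int × List Int)) : Decidable (Spec_filter_groups_py center_boxes out) := by unfold Spec_filter_groups_py; infer_instance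

-- ===== CLAIM (what is proved, stated in full; the proofs are below) =====
def Claim_equal_filter_groups_py : Prop := ∀ (center_boxes : List (Int × Int)), Dom_filter_groups_py center_boxes → Spec_filter_groups_py center_boxes (filter_groups_py center_boxes)

-- ===== LEMMAS AND PROOFS =====

theorem range'_map_split (s k : Nat) :
    (List.range' s (k + 1)).map Int.ofNat = (s : Int) :: (List.range' (s + 1) k).map Int.ofNat := rfl

theorem pyInnerGo_ge (fuel : Nat) : ∀ (boxes : List (Int × Int)) (y : Int) (more : Nat),
    more ≤ pyInnerGo fuel boxes y more := by
  induction fuel with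
  | zero => intro boxes y more; simp [pyInnerGo]
  | succ k ih =>
    intro boxes y more
    simp only [pyInnerGo]
    split
    · split
      · exact le_trans (Nat.le_succ more) (ih boxes _ (more + 1))
      · exact le_refl more
    · exact le_refl more

theorem pyInner_ge (boxes : List (Int × Int)) (y : Int) (more : Nat) :
    more ≤ pyInner boxes y more := pyInnerGo_ge _ _ _ _

theorem pyInner_step (boxes : List (Int × Int)) (y : Int) (more : Nat)
    (hlt : more < boxes.length) (hle : boxes[more].2 - y ≤ 5) :
    pyInner boxes y more = pyInner boxes boxes[more].2 (more + 1) := by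
  unfold pyInner
  have h1 : boxes.length - more = (boxes.length - (more + 1)) + 1 := by omega
  rw [h1]
  simp [pyInnerGo, hlt, hle]

theorem pyInner_gap (boxes : List (Int × Int)) (y : Int) (more : Nat)
    (hlt : more < boxes.length) (hgt : ¬ boxes[more].2 - y ≤ 5) :
    pyInner boxes y more = more := by
  unfold pyInner
  have h1 : boxes.length - more = (boxes.length - (more + 1)) + 1 := by omega
  rw [h1]
  simp [pyInnerGo, hlt, hgt]

theorem pyInner_end (boxes : List (Int × Int)) (y : Int) (more : Nat)
    (h : ¬ more < boxes.length) : pyInner boxes y more = more := by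
  unfold pyInner
  have h1 : boxes.length - more = 0 := by omega
  rw [h1]
  rfl

theorem pyOuterGo_irrel (fuel : Nat) : ∀ (fuel' : Nat) (boxes : List (Int × Int))
    (cnt g : Nat) (groups : List (Int × List Int)),
    boxes.length - cnt ≤ fuel → boxes.length - cnt ≤ fuel' →
    pyOuterGo fuel boxes cnt g groups = pyOuterGo fuel' boxes cnt g groups := by
  induction fuel with
  | zero =>
    intro fuel' boxes cnt g groups h h'
    have hlt : ¬ cnt < boxes.length := by omega
    cases fuel' with
    | zero => rfl
    | succ k' => simp [pyOuterGo, hlt]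
  | succ k ih =>
    intro fuel' boxes cnt g groups h h'
    cases fuel' with
    | zero =>
      have hlt : ¬ cnt < boxes.length := by omega
      simp [pyOuterGo, hlt]
    | succ k' =>
      by_cases hlt : cnt < boxes.length
      · have hge := pyInner_ge boxes boxes[cnt].2 cnt
        simp only [pyOuterGo, dif_pos hlt]
        by_cases he : pyInner boxes boxes[cnt].2 cnt = cnt
        · rw [if_pos he, if_pos he]
          rw [he]
          exact ih k' boxes (cnt + 1) (g + 1) _ (by omega) (by omega)
        · rw [if_neg he, if_neg he]
          exact ih k' boxes _ (g + 1) _ (by omega) (by omega)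
      · simp [pyOuterGo, hlt]

theorem pyOuter_stop (boxes : List (Int × Int)) (cnt g : Nat)
    (groups : List (Int × List Int)) (h : ¬ cnt < boxes.length) :
    pyOuter boxes cnt g groups = groups := by
  unfold pyOuter
  have h1 : boxes.length - cnt = 0 := by omega
  rw [h1]
  rfl

theorem pyOuter_step (boxes : List (Int × Int)) (cnt g : Nat)
    (groups : List (Int × List Int)) (hlt : cnt < boxes.length) :
    pyOuter boxes cnt g groups =
      (if pyInner boxes boxes[cnt].2 cnt = cnt
       then pyOuter boxes (cnt + 1) (g + 1)
              (groups ++ [((g : Int), (List.range' cnt (pyInner boxes boxes[cnt].2 cnt - cnt)).map Int.ofNat)])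
       else pyOuter boxes (pyInner boxes boxes[cnt].2 cnt) (g + 1)
              (groups ++ [((g : Int), (List.range' cnt (pyInner boxes boxes[cnt].2 cnt - cnt)).map Int.ofNat)])) := by
  conv_lhs => unfold pyOuter
  have h1 : boxes.length - cnt = (boxes.length - (cnt + 1)) + 1 := by omega
  rw [h1]
  have hge := pyInner_ge boxes boxes[cnt].2 cnt
  simp only [pyOuterGo, dif_pos hlt]
  by_cases he : pyInner boxes boxes[cnt].2 cnt = cnt
  · rw [if_pos he, if_pos he, he]
    exact pyOuterGo_irrel _ _ boxes (cnt + 1) (g + 1) _ (by omega) (by omega)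
  · rw [if_neg he, if_neg he]
    exact pyOuterGo_irrel _ _ boxes _ (g + 1) _ (by omega) (by omega)

theorem zipIdx_drop_cons (boxes : List (Int × Int)) (m : Nat) (h : m < boxes.length) :
    boxes.zipIdx.drop m = (boxes[m], m) :: boxes.zipIdx.drop (m + 1) := by
  have hz : m < boxes.zipIdx.length := by simpa using h
  rw [List.drop_eq_getElem_cons hz]
  simp

-- MAIN invariant: folding B's step over the suffix from index `more`, starting mid-group,
-- produces exactly what A's outer loop produces after closing the current group at pyInner.
theorem main_inv (boxes : List (Int × Int)) (more : Nat) (h : more ≤ boxes.length)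
    (G : List (Int × List Int)) (cur : List Int) (g : Nat) (y : Int) (hcur : cur ≠ []) :
    (let st := (boxes.zipIdx.drop more).foldl altStep (G, cur, g, y)
     st.1 ++ [((st.2.2.1 : Int), st.2.1)])
      = pyOuter boxes (pyInner boxes y more) (g + 1)
          (G ++ [((g : Int), cur ++ (List.range' more (pyInner boxes y more - more)).map Int.ofNat)]) := by
  by_cases hlt : more < boxes.length
  · rw [zipIdx_drop_cons boxes more hlt]
    by_cases hle : boxes[more].2 - y ≤ 5
    · -- still the same group
      have hstep : altStep (G, cur, g, y) (boxes[more], more)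
          = (G, cur ++ [(more : Int)], g, boxes[more].2) := by
        simp [altStep]; omega
      have hinn : pyInner boxes y more = pyInner boxes boxes[more].2 (more + 1) :=
        pyInner_step boxes y more hlt hle
      have hge : more + 1 ≤ pyInner boxes boxes[more].2 (more + 1) := pyInner_ge _ _ _
      have ih := main_inv boxes (more + 1) hlt G (cur ++ [(more : Int)]) g boxes[more].2
        (by simp)
      simp only [List.foldl_cons, hstep]
      rw [ih, hinn]
      congr 2
      have h1 : pyInner boxes boxes[more].2 (more + 1) - more
          = (pyInner boxes boxes[more].2 (more + 1) - (more + 1)) + 1 := by omega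
      rw [h1, range'_map_split]
      simp
    · -- gap > 5: A closes the group here; B flushes and starts a new current
      have hstep : altStep (G, cur, g, y) (boxes[more], more)
          = (G ++ [((g : Int), cur)], [(more : Int)], g + 1, boxes[more].2) := by
        simp [altStep, hcur]; omega
      have hinn : pyInner boxes y more = more := pyInner_gap boxes y more hlt hle
      have hinn2 : pyInner boxes boxes[more].2 more = pyInner boxes boxes[more].2 (more + 1) :=
        pyInner_step boxes boxes[more].2 more hlt (by omega)
      have hge : more + 1 ≤ pyInner boxes boxes[more].2 (more + 1) := pyInner_ge _ _ _
      have ih := main_inv boxes (more + 1) hlt (G ++ [((g : Int), cur)]) [(more : Int)] (g + 1)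
        boxes[more].2 (by simp)
      simp only [List.foldl_cons, hstep]
      rw [ih, hinn]
      -- unfold A's next outer iteration at cnt = more
      rw [pyOuter_step boxes more (g + 1) _ hlt, hinn2]
      have hne : ¬ pyInner boxes boxes[more].2 (more + 1) = more := by omega
      rw [if_neg hne]
      congr 2
      · simp
      · have h1 : pyInner boxes boxes[more].2 (more + 1) - more
            = (pyInner boxes boxes[more].2 (more + 1) - (more + 1)) + 1 := by omega
        rw [h1, range'_map_split]
        simp
  · -- suffix exhausted: both sides close the final group
    have hm : more = boxes.length := by omega
    have hdrop : boxes.zipIdx.drop more = [] := by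
      apply List.drop_eq_nil_of_le; simpa using le_of_eq hm.symm
    have hinn : pyInner boxes y more = more := pyInner_end boxes y more hlt
    rw [hdrop, hinn, pyOuter_stop boxes more (g + 1) _ hlt]
    simp
termination_by boxes.length - more

-- ===== VERDICT (by name: the statement is the Claim_ definition above) =====
theorem filter_groups_py_spec : Claim_equal_filter_groups_py := by
  intro boxes _
  unfold Spec_filter_groups_py filter_groups_py filter_groups_py_alt
  cases hb : boxes with
  | nil => simp [pyOuter, pyOuterGo]
  | cons b rest =>
    have hlen : 0 < (b :: rest).length := by simp
    have hz0 : (b :: rest).zipIdx = ((b, 0) : (Int × Int) × Nat) :: (b :: rest).zipIdx.drop 1 := by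
      simp
    have hstep : altStep ([], [], 0, 0) (b, 0) = ([], [(0 : Int)], 0, b.2) := by
      simp [altStep]
    have hinn0 : pyInner (b :: rest) (b :: rest)[0].2 0 = pyInner (b :: rest) b.2 1 :=
      pyInner_step (b :: rest) (b :: rest)[0].2 0 hlen (by simp)
    have hge : 1 ≤ pyInner (b :: rest) b.2 1 := pyInner_ge _ _ _
    have hmain := main_inv (b :: rest) 1 (by simp) [] [(0 : Int)] 0 b.2 (by simp)
    simp only [reduceCtorEq, if_false]
    rw [hz0]
    simp only [List.foldl_cons, hstep]
    rw [hmain]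
    -- A's first outer iteration
    rw [pyOuter_step (b :: rest) 0 0 [] hlen, hinn0]
    have hne : ¬ pyInner (b :: rest) b.2 1 = 0 := by omega
    rw [if_neg hne]
    congr 2
    have h1 : pyInner (b :: rest) b.2 1 - 0 = (pyInner (b :: rest) b.2 1 - 1) + 1 := by omega
    rw [h1, range'_map_split]
    simp
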